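-- pv_equiv track=rewrite | github.com/Aider-AI/aider | aider/coders/editblock_coder.py | match_but_for_leading_whitespace
-- ===== SOURCE A (Python) =====
-- def match_but_for_leading_whitespace(whole_lines, part_lines):
--     num = len(whole_lines)
--
--     # does the non-whitespace all agree?
--     if not all(whole_lines[i].lstrip() == part_lines[i].lstrip() for i in range(num)):
--         return
--
--     # are they all offset the same?
--     add = set(
--         whole_lines[i][: len(whole_lines[i]) - len(part_lines[i])]
--         for i in range(num)
--         if whole_lines[i].strip()
--     )
--
--     if len(add) != 1:
--         return
--
--     return add.pop()
-- ===== SOURCE B (Python) =====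
-- def match_but_for_leading_whitespace(whole_lines, part_lines):
--     FAIL = ("fail",)
--     SKIP = ("skip",)
--
--     def classify(i):
--         w = whole_lines[i]
--         p = part_lines[i]
--         if w.lstrip() != p.lstrip():
--             return FAIL
--         if not w.strip():
--             return SKIP
--         return w[: len(w) - len(p)]
--
--     def merge(x, y):
--         if x is FAIL or y is FAIL:
--             return FAIL
--         if x is SKIP:
--             return y
--         if y is SKIP:
--             return x
--         return x if x == y else FAIL
--
--     def solve(lo, hi):
--         n = hi - lo
--         if n == 0:
--             return SKIP
--         if n == 1:
--             return classify(lo)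
--         mid = (lo + hi) // 2
--         left = solve(lo, mid)
--         if left is FAIL:
--             return FAIL
--         return merge(left, solve(mid, hi))
--
--     res = solve(0, len(whole_lines))
--     if res is FAIL or res is SKIP:
--         return None
--     return res
-- ===== Notes on version B (the rewrite author's own statement) =====
-- stated objective: alternative
-- what changed: Replaces A's two comprehension passes plus a set by a divide-and-conquer recursion: each line is mapped to fail/skip/prefix and halves are combined with an associative merge semigroup (fail absorbing, skip identity, equal prefixes merge).
import Mathlib
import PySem

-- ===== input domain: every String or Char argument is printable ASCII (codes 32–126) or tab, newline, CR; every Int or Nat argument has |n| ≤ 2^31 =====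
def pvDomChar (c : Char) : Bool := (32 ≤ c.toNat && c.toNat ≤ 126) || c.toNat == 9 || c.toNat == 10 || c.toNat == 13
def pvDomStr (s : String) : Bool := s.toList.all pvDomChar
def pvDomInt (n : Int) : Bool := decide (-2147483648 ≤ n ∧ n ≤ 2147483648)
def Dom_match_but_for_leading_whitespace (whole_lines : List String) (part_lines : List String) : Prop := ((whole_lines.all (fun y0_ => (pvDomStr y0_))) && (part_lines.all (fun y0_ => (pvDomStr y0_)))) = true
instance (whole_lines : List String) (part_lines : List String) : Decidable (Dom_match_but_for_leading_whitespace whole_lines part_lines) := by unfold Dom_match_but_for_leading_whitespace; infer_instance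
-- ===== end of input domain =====

-- B replaces A's two comprehension passes plus a set by a divide-and-conquer recursion combining
-- per-line results (fail/skip/prefix) with an associative merge semigroup; same cost, different algorithm.


-- ===== PORT A =====
def match_but_for_leading_whitespace (whole_lines : List String) (part_lines : List String) : Option String :=
  let num := whole_lines.length
  if !((List.range num).all (fun i =>
      PySem.Str.lstrip (whole_lines.getD i "") == PySem.Str.lstrip (part_lines.getD i ""))) then
    none
  else
    let add : PySem.Set String := PySem.Set.ofList (((List.range num).filter (fun i =>
        PySem.Str.strip (whole_lines.getD i "") ≠ "")).map (fun i =>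
        PySem.Str.slice (whole_lines.getD i "") none
          (some (PySem.Str.len (whole_lines.getD i "") - PySem.Str.len (part_lines.getD i "")))))
    if add.length ≠ 1 then none else add.head?

-- ===== PORT B =====
-- B's per-line result: FAIL / SKIP / a concrete whitespace prefix
inductive PvSt
  | fail : PvSt
  | skip : PvSt
  | pre : String → PvSt
deriving DecidableEq, Repr

-- classify(i) of Source B
def pvClassify (whole_lines part_lines : List String) (i : Nat) : PvSt :=
  if PySem.Str.lstrip (whole_lines.getD i "") ≠ PySem.Str.lstrip (part_lines.getD i "") then .fail
  else if PySem.Str.strip (whole_lines.getD i "") = "" then .skip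
  else .pre (PySem.Str.slice (whole_lines.getD i "") none
    (some (PySem.Str.len (whole_lines.getD i "") - PySem.Str.len (part_lines.getD i ""))))

-- merge(x, y) of Source B
def pvMerge : PvSt → PvSt → PvSt
  | .fail, _ => .fail
  | _, .fail => .fail
  | .skip, y => y
  | x, .skip => x
  | .pre s, .pre t => if s = t then .pre s else .fail

-- solve(lo, hi) of Source B: divide and conquer over the index range
def pvSolve (whole_lines part_lines : List String) (lo hi : Nat) : PvSt :=
  if hi - lo = 0 then .skip
  else if hi - lo = 1 then pvClassify whole_lines part_lines lo
  else
    let mid := (lo + hi) / 2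
    let left := pvSolve whole_lines part_lines lo mid
    if left = .fail then .fail
    else pvMerge left (pvSolve whole_lines part_lines mid hi)
termination_by hi - lo
decreasing_by all_goals omega

def match_but_for_leading_whitespace_alt (whole_lines : List String) (part_lines : List String) : Option String :=
  match pvSolve whole_lines part_lines 0 whole_lines.length with
  | .fail => none
  | .skip => none
  | .pre s => some s

-- ===== PRECONDITION & SPEC =====
-- Pre_ excludes exactly the inputs where the Python A raises IndexError: part_lines shorter than
-- whole_lines while every in-range line pair agrees after lstrip (the generator then indexes past part_lines).
def Pre_match_but_for_leading_whitespace (whole_lines : List String) (part_lines : List String) : Prop :=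
  ¬ (part_lines.length < whole_lines.length ∧
     ∀ i < part_lines.length,
       PySem.Str.lstrip (whole_lines.getD i "") = PySem.Str.lstrip (part_lines.getD i ""))
instance (whole_lines : List String) (part_lines : List String) : Decidable (Pre_match_but_for_leading_whitespace whole_lines part_lines) := by unfold Pre_match_but_for_leading_whitespace; infer_instance
def pvWitness_match_but_for_leading_whitespace : List String × List String := (["  ab", ""], ["ab", ""])

def Spec_match_but_for_leading_whitespace (whole_lines : List String) (part_lines : List String) (out : Option String) : Prop := out = match_but_for_leading_whitespace_alt whole_lines part_lines
instance (whole_lines : List String) (part_lines : List String) (out : Option String) : Decidable (Spec_match_but_for_leading_whitespace whole_lines part_lines out) := by unfold Spec_match_but_for_leading_whitespace; infer_instance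

-- ===== CLAIM (what is proved, stated in full; the proofs are below) =====
def Claim_equal_match_but_for_leading_whitespace : Prop := ∀ (whole_lines : List String) (part_lines : List String), Dom_match_but_for_leading_whitespace whole_lines part_lines → Pre_match_but_for_leading_whitespace whole_lines part_lines → Spec_match_but_for_leading_whitespace whole_lines part_lines (match_but_for_leading_whitespace whole_lines part_lines)

-- ===== LEMMAS AND PROOFS =====

theorem pvMerge_fail_right (x : PvSt) : pvMerge x .fail = .fail := by cases x <;> rfl
theorem pvMerge_skip_left (y : PvSt) : pvMerge .skip y = y := by cases y <;> rfl
theorem pvMerge_skip_right (x : PvSt) : pvMerge x .skip = x := by cases x <;> rfl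

theorem pvMerge_assoc (x y z : PvSt) : pvMerge (pvMerge x y) z = pvMerge x (pvMerge y z) := by
  cases x <;> cases y <;> cases z <;>
    simp only [pvMerge] <;>
    split_ifs <;> simp_all

-- the linear combination B's divide and conquer computes
def pvF (xs : List PvSt) : PvSt := xs.foldr pvMerge .skip

theorem pvF_append (xs ys : List PvSt) : pvF (xs ++ ys) = pvMerge (pvF xs) (pvF ys) := by
  induction xs with
  | nil => simp [pvF, pvMerge_skip_left]
  | cons a t ih => simp [pvF, List.foldr] at ih ⊢; rw [ih, ← pvMerge_assoc]

theorem pvSolve_eq_pvF (wl pl : List String) :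
    ∀ n lo hi, hi - lo = n →
      pvSolve wl pl lo hi = pvF (((List.range' lo (hi - lo)).map (pvClassify wl pl))) := by
  intro n
  induction n using Nat.strong_induction_on with
  | _ n ih =>
    intro lo hi hn
    rw [pvSolve]
    by_cases h0 : hi - lo = 0
    · simp [h0, pvF]
    · by_cases h1 : hi - lo = 1
      · simp [h1, pvF, pvMerge_skip_right]
      · have hmid1 : (lo + hi) / 2 - lo < n := by omega
        have hmid2 : hi - (lo + hi) / 2 < n := by omega
        have hL := ih _ hmid1 lo ((lo + hi) / 2) rfl
        have hR := ih _ hmid2 ((lo + hi) / 2) hi rfl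
        have hsplit : List.range' lo (hi - lo) =
            List.range' lo ((lo + hi) / 2 - lo) ++ List.range' ((lo + hi) / 2) (hi - (lo + hi) / 2) := by
          have h2 := @List.range'_append lo ((lo + hi) / 2 - lo) (hi - (lo + hi) / 2) 1
          simp only [one_mul] at h2
          rw [show lo + ((lo + hi) / 2 - lo) = (lo + hi) / 2 by omega] at h2
          rw [h2]
          congr 1
          omega
        simp only [h0, h1, if_false]
        rw [hsplit, List.map_append, pvF_append, hL, hR]
        by_cases hf : pvSolve wl pl lo ((lo + hi) / 2) = .fail
        · rw [hL] at hf; simp [hf, pvMerge]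
        · rw [hL] at hf; simp [hf]

theorem pvF_fail_of_mem (xs : List PvSt) (h : PvSt.fail ∈ xs) : pvF xs = .fail := by
  induction xs with
  | nil => cases h
  | cons a t ih =>
    rcases List.mem_cons.mp h with rfl | h'
    · rfl
    · simp only [pvF, List.foldr] at ih ⊢; rw [ih h', pvMerge_fail_right]

-- the prefixes recorded in a list of states
def pvPres (xs : List PvSt) : List String :=
  xs.filterMap (fun s => match s with | .pre t => some t | _ => none)

theorem pvF_char (xs : List PvSt) (h : PvSt.fail ∉ xs) :
    pvF xs = (match pvPres xs with
      | [] => PvSt.skip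
      | x :: rest => if rest.all (· == x) then PvSt.pre x else PvSt.fail) := by
  induction xs with
  | nil => rfl
  | cons a t ih =>
    have ha : a ≠ .fail := fun e => h (e ▸ List.mem_cons_self ..)
    have ht : PvSt.fail ∉ t := fun e => h (List.mem_cons_of_mem _ e)
    have ih' := ih ht
    cases a with
    | fail => exact absurd rfl ha
    | skip =>
      simp only [pvF, List.foldr, pvMerge_skip_left] at ih' ⊢
      simpa [pvPres] using ih'
    | pre s =>
      simp only [pvF, List.foldr] at ih' ⊢
      rw [ih']
      show pvMerge (PvSt.pre s) _ =
        (match s :: pvPres t with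
          | [] => PvSt.skip
          | x :: rest => if rest.all (· == x) then PvSt.pre x else PvSt.fail)
      cases hp : pvPres t with
      | nil => simp [pvMerge_skip_right]
      | cons x rest =>
        show pvMerge (PvSt.pre s) (if rest.all (· == x) then PvSt.pre x else PvSt.fail) =
          if ((x :: rest).all (· == s)) then PvSt.pre s else PvSt.fail
        by_cases hall : rest.all (· == x)
        · rw [if_pos hall]
          by_cases hsx : s = x
          · subst hsx
            simp [pvMerge, List.all_cons, hall]
          · have hne : ¬ ((x :: rest).all (· == s)) = true := by
              simp [List.all_cons]; intro e; exact absurd e.symm hsx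
            simp [pvMerge, hsx, hne]
        · rw [if_neg hall, pvMerge_fail_right]
          have hne : ¬ ((x :: rest).all (· == s)) = true := by
            intro hc
            simp only [List.all_cons, Bool.and_eq_true, beq_iff_eq] at hc
            apply hall
            rw [List.all_eq_true] at hc ⊢
            intro y hy
            have := hc.2 y hy
            simp_all
          simp [hne]

-- for indices whose lstrip test passes, pvPres ∘ classify is the filtered-map prefix list
theorem pvPres_classify (wl pl : List String) (l : List Nat)
    (h : ∀ i ∈ l, PySem.Str.lstrip (wl.getD i "") = PySem.Str.lstrip (pl.getD i "")) :
    pvPres (l.map (pvClassify wl pl)) =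
      (l.filter (fun i => decide (PySem.Str.strip (wl.getD i "") ≠ ""))).map (fun i =>
        PySem.Str.slice (wl.getD i "") none
          (some (PySem.Str.len (wl.getD i "") - PySem.Str.len (pl.getD i "")))) := by
  induction l with
  | nil => rfl
  | cons a t ih =>
    have ha := h a (List.mem_cons_self ..)
    have ih' := ih (fun i hi => h i (List.mem_cons_of_mem _ hi))
    by_cases hb : PySem.Str.strip (wl.getD a "") = ""
    · have hca : pvClassify wl pl a = .skip := by
        unfold pvClassify; rw [if_neg (not_not_intro ha), if_pos hb]
      simp only [List.map_cons, pvPres, List.filterMap_cons, hca, List.filter_cons, hb]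
      simpa [pvPres] using ih'
    · have hca : pvClassify wl pl a = .pre (PySem.Str.slice (wl.getD a "") none
        (some (PySem.Str.len (wl.getD a "") - PySem.Str.len (pl.getD a "")))) := by
        unfold pvClassify; rw [if_neg (not_not_intro ha), if_neg hb]
      simp only [List.map_cons, pvPres, List.filterMap_cons, hca, List.filter_cons]
      simp only [pvPres] at ih'
      simp only [List.getD_eq_getElem?_getD] at hb ih' ⊢
      simp [hb, ih']

theorem pvClassify_fail_iff (wl pl : List String) (i : Nat) :
    pvClassify wl pl i = .fail ↔
      PySem.Str.lstrip (wl.getD i "") ≠ PySem.Str.lstrip (pl.getD i "") := by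
  unfold pvClassify
  split_ifs with h1 h2 <;> simp_all [List.getD_eq_getElem?_getD]


theorem nodup_singleton_of_all_eq {α : Type} (l : List α) (x : α)
    (hn : l.Nodup) (hx : x ∈ l) (hall : ∀ y ∈ l, y = x) : l = [x] := by
  match l with
  | [] => cases hx
  | [a] => simp [hall a (by simp)]
  | a :: b :: t =>
    have ha := hall a (by simp)
    have hb := hall b (by simp)
    simp [ha, hb] at hn

theorem main_equiv (wl pl : List String) :
    match_but_for_leading_whitespace wl pl = match_but_for_leading_whitespace_alt wl pl := by
  unfold match_but_for_leading_whitespace match_but_for_leading_whitespace_alt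
  rw [pvSolve_eq_pvF wl pl (wl.length - 0) 0 wl.length rfl]
  simp only [Nat.sub_zero, ← List.range_eq_range']
  by_cases hall : ∀ j ∈ List.range wl.length,
      PySem.Str.lstrip (wl.getD j "") = PySem.Str.lstrip (pl.getD j "")
  · have hcond : (List.range wl.length).all (fun i =>
        PySem.Str.lstrip (wl.getD i "") == PySem.Str.lstrip (pl.getD i "")) = true := by
      rw [List.all_eq_true]; intro j hj; simpa [beq_iff_eq] using hall j hj
    have hnf : PvSt.fail ∉ (List.range wl.length).map (pvClassify wl pl) := by
      intro hmem
      obtain ⟨j, hj, he⟩ := List.mem_map.mp hmem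
      exact ((pvClassify_fail_iff wl pl j).mp he) (hall j hj)
    rw [pvF_char _ hnf, pvPres_classify wl pl _ hall]
    simp only [hcond, Bool.not_true, Bool.false_eq_true, if_false]
    cases hPc : ((List.range wl.length).filter (fun i =>
        decide (PySem.Str.strip (wl.getD i "") ≠ ""))).map (fun i =>
        PySem.Str.slice (wl.getD i "") none
          (some (PySem.Str.len (wl.getD i "") - PySem.Str.len (pl.getD i "")))) with
    | nil => simp [PySem.Set.ofList]
    | cons x xs =>
      by_cases hx : xs.all (· == x)
      · have hset : PySem.Set.ofList (x :: xs) = [x] := by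
          apply nodup_singleton_of_all_eq
          · exact PySem.Set.nodup_ofList _
          · rw [PySem.Set.mem_ofList]; simp
          · intro y hy
            rw [PySem.Set.mem_ofList] at hy
            rcases List.mem_cons.mp hy with rfl | hy'
            · rfl
            · simpa using (List.all_eq_true.mp hx) y hy'
        simp [hx, hset]
      · obtain ⟨y, hy, hyx⟩ : ∃ y ∈ xs, y ≠ x := by
          simpa [List.all_eq_true] using hx
        have hlen : (PySem.Set.ofList (x :: xs)).length ≠ 1 := by
          intro h1
          obtain ⟨z, hz⟩ := List.length_eq_one_iff.mp h1
          have hxz : x ∈ PySem.Set.ofList (x :: xs) := by rw [PySem.Set.mem_ofList]; simp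
          have hyz : y ∈ PySem.Set.ofList (x :: xs) := by
            rw [PySem.Set.mem_ofList]; exact List.mem_cons_of_mem _ hy
          rw [hz] at hxz hyz
          simp at hxz hyz
          exact hyx (hyz.trans hxz.symm)
        simp [hx, hlen]
  · simp only [not_forall, exists_prop] at hall
    obtain ⟨j, hj, hne⟩ := hall
    have hcond : (List.range wl.length).all (fun i =>
        PySem.Str.lstrip (wl.getD i "") == PySem.Str.lstrip (pl.getD i "")) = false := by
      rw [List.all_eq_false]
      exact ⟨j, hj, by simpa [beq_iff_eq] using hne⟩
    have hF : pvF ((List.range wl.length).map (pvClassify wl pl)) = .fail := by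
      apply pvF_fail_of_mem
      exact List.mem_map.mpr ⟨j, hj, (pvClassify_fail_iff wl pl j).mpr hne⟩
    simp only [hcond, Bool.not_false, if_pos, hF]

-- ===== VERDICT (by name: the statement is the Claim_ definition above) =====
theorem match_but_for_leading_whitespace_spec : Claim_equal_match_but_for_leading_whitespace := by
  intro wl pl _ _
  unfold Spec_match_but_for_leading_whitespace
  exact main_equiv wl pl
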